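-- pv_equiv track=rewrite | github.com/JFQ111/sfdllm | transfer.py | build_text_descriptions
-- ===== SOURCE A (Python) =====
-- from typing import List, Optional, Tuple
--
-- def build_text_descriptions(class_names: List[str]) -> List[str]:
--     descs = []
--     for name in class_names:
--         lo = name.lower()
--         if "normal" in lo:
--             detail = "Normal state: smooth vibration with no impulsive components."
--         elif "inner" in lo:
--             detail = "Inner race fault: periodic impulses at BPFI frequency."
--         elif "outer" in lo:
--             detail = "Outer race fault: repetitive transient shocks at BPFO frequency in the load zone."
--         elif "ball" in lo:
--             detail = "Rolling element fault: irregular impacts at BSF frequency."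
--         else:
--             detail = f"{name} fault: identify by vibration pattern."
--         descs.append(f"Fault diagnosis result: {detail}")
--     return descs
-- ===== SOURCE B (Python) =====
-- FAULT_TABLE = [
--     ("normal", "Normal state: smooth vibration with no impulsive components."),
--     ("inner", "Inner race fault: periodic impulses at BPFI frequency."),
--     ("outer", "Outer race fault: repetitive transient shocks at BPFO frequency in the load zone."),
--     ("ball", "Rolling element fault: irregular impacts at BSF frequency."),
-- ]
--
-- def build_text_descriptions(class_names):
--     # keyword-major: one sweep over the whole list per keyword, filling only
--     # still-empty slots, so the table order gives the same priority as A's chain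
--     lows = [n.lower() for n in class_names]
--     details = [None] * len(class_names)
--     for kw, desc in FAULT_TABLE:
--         for i, lo in enumerate(lows):
--             if details[i] is None and kw in lo:
--                 details[i] = desc
--     return ["Fault diagnosis result: "
--             + (d if d is not None else f"{n} fault: identify by vibration pattern.")
--             for n, d in zip(class_names, details)]
-- ===== Notes on version B (the rewrite author's own statement) =====
-- stated objective: alternative
-- what changed: Transposes the loop nest: instead of testing the four keywords per name (if/elif chain), B makes one keyword-major sweep per table entry over a parallel details array, filling only still-empty slots, then assembles the output from names zipped with details.
import Mathlib
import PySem

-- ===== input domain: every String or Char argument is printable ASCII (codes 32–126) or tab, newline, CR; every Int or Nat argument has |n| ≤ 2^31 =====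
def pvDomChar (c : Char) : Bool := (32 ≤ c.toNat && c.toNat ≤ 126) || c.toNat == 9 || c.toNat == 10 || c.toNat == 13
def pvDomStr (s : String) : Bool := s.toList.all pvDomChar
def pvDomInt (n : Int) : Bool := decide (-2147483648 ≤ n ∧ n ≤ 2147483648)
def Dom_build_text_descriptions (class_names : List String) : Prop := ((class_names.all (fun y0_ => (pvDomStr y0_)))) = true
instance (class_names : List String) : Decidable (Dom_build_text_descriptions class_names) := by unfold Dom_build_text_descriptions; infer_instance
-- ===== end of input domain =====

-- ===== PORT A =====
def build_text_descriptions (class_names : List String) : List String :=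
  class_names.foldl (fun descs name =>
    let lo := PySem.Str.lower name
    let detail :=
      if PySem.Str.isIn "normal" lo then "Normal state: smooth vibration with no impulsive components."
      else if PySem.Str.isIn "inner" lo then "Inner race fault: periodic impulses at BPFI frequency."
      else if PySem.Str.isIn "outer" lo then "Outer race fault: repetitive transient shocks at BPFO frequency in the load zone."
      else if PySem.Str.isIn "ball" lo then "Rolling element fault: irregular impacts at BSF frequency."
      else name ++ " fault: identify by vibration pattern."
    descs ++ ["Fault diagnosis result: " ++ detail]) []

-- ===== PORT B =====
-- B (Source B): keyword-major sweeps over a parallel details array, then zip with the names.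
def faultTable : List (String × String) :=
  [("normal", "Normal state: smooth vibration with no impulsive components."),
   ("inner", "Inner race fault: periodic impulses at BPFI frequency."),
   ("outer", "Outer race fault: repetitive transient shocks at BPFO frequency in the load zone."),
   ("ball", "Rolling element fault: irregular impacts at BSF frequency.")]

-- one sweep of the inner loop: fill still-empty slots where kw matches
def sweep (kw desc : String) (lows : List String) (details : List (Option String)) : List (Option String) :=
  List.zipWith (fun lo d => if d.isNone && PySem.Str.isIn kw lo then some desc else d) lows details

def build_text_descriptions_alt (class_names : List String) : List String :=
  let lows := class_names.map PySem.Str.lower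
  let details := faultTable.foldl (fun details kd => sweep kd.1 kd.2 lows details)
                   (class_names.map (fun _ => (none : Option String)))
  (class_names.zip details).map (fun nd =>
    "Fault diagnosis result: " ++ nd.2.getD (nd.1 ++ " fault: identify by vibration pattern."))

-- ===== PRECONDITION & SPEC =====
def Spec_build_text_descriptions (class_names : List String) (out : List String) : Prop := out = build_text_descriptions_alt class_names
instance (class_names : List String) (out : List String) : Decidable (Spec_build_text_descriptions class_names out) := by unfold Spec_build_text_descriptions; infer_instance

-- ===== CLAIM (what is proved, stated in full; the proofs are below) =====
def Claim_equal_build_text_descriptions : Prop := ∀ (class_names : List String), Dom_build_text_descriptions class_names → Spec_build_text_descriptions class_names (build_text_descriptions class_names)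

-- ===== LEMMAS AND PROOFS =====
lemma foldl_append_map {α β : Type} (g : α → β) (l : List α) (acc : List β) :
    List.foldl (fun descs name => descs ++ [g name]) acc l = acc ++ l.map g := by
  induction l generalizing acc with
  | nil => simp
  | cons x xs ih => simp [List.foldl, ih]

lemma alt_eq_map (class_names : List String) :
    build_text_descriptions_alt class_names = class_names.map (fun name =>
      "Fault diagnosis result: " ++
        (if PySem.Str.isIn "normal" (PySem.Str.lower name) then "Normal state: smooth vibration with no impulsive components."
         else if PySem.Str.isIn "inner" (PySem.Str.lower name) then "Inner race fault: periodic impulses at BPFI frequency."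
         else if PySem.Str.isIn "outer" (PySem.Str.lower name) then "Outer race fault: repetitive transient shocks at BPFO frequency in the load zone."
         else if PySem.Str.isIn "ball" (PySem.Str.lower name) then "Rolling element fault: irregular impacts at BSF frequency."
         else name ++ " fault: identify by vibration pattern.")) := by
  induction class_names with
  | nil => rfl
  | cons x xs ih =>
    unfold build_text_descriptions_alt at ih ⊢
    simp only [faultTable, List.foldl, List.map, sweep, List.zipWith] at ih ⊢
    simp only [List.zip_cons_cons, List.map_cons, ih]
    cases h1 : PySem.Str.isIn "normal" (PySem.Str.lower x) <;>
    cases h2 : PySem.Str.isIn "inner" (PySem.Str.lower x) <;>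
    cases h3 : PySem.Str.isIn "outer" (PySem.Str.lower x) <;>
    cases h4 : PySem.Str.isIn "ball" (PySem.Str.lower x) <;>
      simp

-- ===== VERDICT (by name: the statement is the Claim_ definition above) =====
theorem build_text_descriptions_spec : Claim_equal_build_text_descriptions := by
  intro class_names _
  unfold Spec_build_text_descriptions build_text_descriptions
  rw [foldl_append_map, List.nil_append, alt_eq_map]
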